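-- pv_equiv track=rewrite | github.com/arrowlanguage/arrow | a4.py | parse_code_block
-- ===== SOURCE A (Python) =====
-- def parse_code_block(code_block):
--     setup_lines = []
--     pattern_handlers = []
--     current_key = None
--     current_actions = []
--
--     lines = [line.strip() for line in code_block.split("\n") if line.strip()]
--     i = 0
--     while i < len(lines):
--         line = lines[i]
--         if "=>" in line:
--             key_part, action_part = line.split("=>", 1)
--             key = key_part.strip()
--             action = action_part.strip()
--             current_key = key
--             current_actions = [action]
--             i += 1
--             # Collect overloaded patterns
--             while i < len(lines) and lines[i].startswith("=>"):
--                 current_actions.append(lines[i][2:].strip())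
--                 i += 1
--             pattern_handlers.append((current_key, current_actions))
--             current_key = None
--         else:
--             setup_lines.append(line)
--             i += 1
--     return setup_lines, pattern_handlers
-- ===== SOURCE B (Python) =====
-- def parse_code_block(code_block):
--     setup_lines = []
--     pattern_handlers = []
--     current = None  # the open handler as (key, actions), flushed when it closes
--
--     for raw in code_block.split("\n"):
--         line = raw.strip()
--         if not line:
--             continue
--         if current is not None and line.startswith("=>"):
--             current[1].append(line[2:].strip())
--         elif "=>" in line:
--             if current is not None:
--                 pattern_handlers.append(current)
--             key, action = line.split("=>", 1)
--             current = (key.strip(), [action.strip()])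
--         else:
--             if current is not None:
--                 pattern_handlers.append(current)
--                 current = None
--             setup_lines.append(line)
--     if current is not None:
--         pattern_handlers.append(current)
--     return setup_lines, pattern_handlers
-- ===== Notes on version B (the rewrite author's own statement) =====
-- stated objective: simpler
-- what changed: Replaces the outer-while/inner-while index machine over a precomputed line list with one flat for-loop over the raw lines that strips each line on the fly and keeps a reference to the currently open handler, appending arrow-continuation lines to it and flushing it when it closes.
import Mathlib
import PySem

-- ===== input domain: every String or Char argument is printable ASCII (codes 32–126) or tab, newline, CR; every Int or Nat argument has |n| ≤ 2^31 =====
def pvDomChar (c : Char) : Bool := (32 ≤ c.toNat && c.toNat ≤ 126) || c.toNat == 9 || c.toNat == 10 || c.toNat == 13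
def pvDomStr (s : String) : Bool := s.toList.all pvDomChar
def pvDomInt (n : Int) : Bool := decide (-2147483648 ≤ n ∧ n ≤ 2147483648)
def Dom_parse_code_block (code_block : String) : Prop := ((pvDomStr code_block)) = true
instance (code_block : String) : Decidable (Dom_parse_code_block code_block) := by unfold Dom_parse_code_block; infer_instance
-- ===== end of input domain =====

-- B replaces A's outer-while/inner-while index machine with one flat fold over the raw
-- lines, keeping the currently open handler as explicit state (objective: simpler).

-- ===== PORT A =====
-- inner while: collect the '=>'-prefixed lines into current_actions, return (actions, remaining lines)
def pvCollectA : List String → List String → List String × List String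
  | [], acc => (acc, [])
  | l :: rest, acc =>
    if PySem.Str.startswith l "=>" then
      pvCollectA rest (acc ++ [PySem.Str.strip (PySem.Str.slice l (some 2) none)])
    else (acc, l :: rest)

theorem pvCollectA_snd_le (ls acc : List String) : (pvCollectA ls acc).2.length ≤ ls.length := by
  induction ls generalizing acc with
  | nil => simp [pvCollectA]
  | cons l rest ih =>
    simp only [pvCollectA]
    split
    · exact Nat.le_succ_of_le (ih _)
    · exact Nat.le_refl _

-- outer while over the remaining lines (index i → suffix)
def pvLoopA : List String → List String → List (String × List String) → List String × List (String × List String)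
  | [], setup, handlers => (setup, handlers)
  | line :: rest, setup, handlers =>
    if PySem.Str.isIn "=>" line then
      let parts := (PySem.Str.splitMax? line "=>" 1).getD []
      let key := PySem.Str.strip (parts.getD 0 "")
      let action := PySem.Str.strip (parts.getD 1 "")
      let r := pvCollectA rest [action]
      pvLoopA r.2 setup (handlers ++ [(key, r.1)])
    else pvLoopA rest (setup ++ [line]) handlers
termination_by ls _ _ => ls.length
decreasing_by
  · exact Nat.lt_succ_of_le (pvCollectA_snd_le _ _)
  · simp

def parse_code_block (code_block : String) : List String × (List (String × List String)) :=
  let lines := (((PySem.Str.split? code_block "\n").getD []).map PySem.Str.strip).filter (· ≠ "")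
  pvLoopA lines [] []

-- ===== PORT B =====
-- one step of B's flat for-loop; state = (setup_lines, flushed handlers, open handler)
def pvStepB (st : List String × List (String × List String) × Option (String × List String))
    (raw : String) : List String × List (String × List String) × Option (String × List String) :=
  let line := PySem.Str.strip raw
  if line = "" then st
  else
    let (setup, handlers, cur) := st
    if cur.isSome && PySem.Str.startswith line "=>" then
      match cur with
      | some (k, acts) => (setup, handlers, some (k, acts ++ [PySem.Str.strip (PySem.Str.slice line (some 2) none)]))
      | none => st
    else if PySem.Str.isIn "=>" line then
      let handlers' := match cur with | some c => handlers ++ [c] | none => handlers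
      let parts := (PySem.Str.splitMax? line "=>" 1).getD []
      (setup, handlers', some (PySem.Str.strip (parts.getD 0 ""), [PySem.Str.strip (parts.getD 1 "")]))
    else
      let handlers' := match cur with | some c => handlers ++ [c] | none => handlers
      (setup ++ [line], handlers', none)

def parse_code_block_alt (code_block : String) : List String × (List (String × List String)) :=
  let st := ((PySem.Str.split? code_block "\n").getD []).foldl pvStepB ([], [], none)
  (st.1, match st.2.2 with | some c => st.2.1 ++ [c] | none => st.2.1)

-- ===== PRECONDITION & SPEC =====
def Spec_parse_code_block (code_block : String) (out : List String × (List (String × List String))) : Prop := out = parse_code_block_alt code_block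
instance (code_block : String) (out : List String × (List (String × List String))) : Decidable (Spec_parse_code_block code_block out) := by unfold Spec_parse_code_block; infer_instance

-- ===== CLAIM (what is proved, stated in full; the proofs are below) =====
def Claim_equal_parse_code_block : Prop := ∀ (code_block : String), Dom_parse_code_block code_block → Spec_parse_code_block code_block (parse_code_block code_block)

-- ===== LEMMAS AND PROOFS =====

-- B's step on a raw line is: skip it if it strips empty, else the core step on the stripped line.
def pvCoreB (st : List String × List (String × List String) × Option (String × List String))
    (line : String) : List String × List (String × List String) × Option (String × List String) :=
  let (setup, handlers, cur) := st
  if cur.isSome && PySem.Str.startswith line "=>" then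
    match cur with
    | some (k, acts) => (setup, handlers, some (k, acts ++ [PySem.Str.strip (PySem.Str.slice line (some 2) none)]))
    | none => st
  else if PySem.Str.isIn "=>" line then
    let handlers' := match cur with | some c => handlers ++ [c] | none => handlers
    let parts := (PySem.Str.splitMax? line "=>" 1).getD []
    (setup, handlers', some (PySem.Str.strip (parts.getD 0 ""), [PySem.Str.strip (parts.getD 1 "")]))
  else
    let handlers' := match cur with | some c => handlers ++ [c] | none => handlers
    (setup ++ [line], handlers', none)

theorem pvStepB_eq (st : List String × List (String × List String) × Option (String × List String))
    (raw : String) :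
    pvStepB st raw = if PySem.Str.strip raw = "" then st else pvCoreB st (PySem.Str.strip raw) := by
  obtain ⟨s, h, c⟩ := st
  simp only [pvStepB, pvCoreB]

-- folding B over the raw lines = folding the core over the stripped non-empty lines
theorem pvFoldB_eq_core (raws : List String)
    (st : List String × List (String × List String) × Option (String × List String)) :
    raws.foldl pvStepB st = ((raws.map PySem.Str.strip).filter (· ≠ "")).foldl pvCoreB st := by
  induction raws generalizing st with
  | nil => rfl
  | cons r rest ih =>
    simp only [List.map_cons, List.filter_cons, List.foldl_cons, pvStepB_eq]
    by_cases h : PySem.Str.strip r = "" <;> simp [h, ih]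

def pvFinB (st : List String × List (String × List String) × Option (String × List String)) :
    List String × List (String × List String) :=
  (st.1, match st.2.2 with | some c => st.2.1 ++ [c] | none => st.2.1)

-- the new handler pvCoreB opens on a line containing "=>"
def pvNewH (line : String) : String × List String :=
  (PySem.Str.strip (((PySem.Str.splitMax? line "=>" 1).getD []).getD 0 ""),
   [PySem.Str.strip (((PySem.Str.splitMax? line "=>" 1).getD []).getD 1 "")])

theorem pvCoreB_none (setup : List String) (handlers : List (String × List String)) (line : String) :
    pvCoreB (setup, handlers, none) line =
      if PySem.Str.isIn "=>" line then (setup, handlers, some (pvNewH line))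
      else (setup ++ [line], handlers, none) := by
  simp only [pvCoreB, pvNewH, Option.isSome_none, Bool.false_and]
  rw [if_neg (by simp)]

theorem pvCoreB_some (setup : List String) (handlers : List (String × List String))
    (k : String) (acts : List String) (line : String) :
    pvCoreB (setup, handlers, some (k, acts)) line =
      if PySem.Str.startswith line "=>" then
        (setup, handlers, some (k, acts ++ [PySem.Str.strip (PySem.Str.slice line (some 2) none)]))
      else if PySem.Str.isIn "=>" line then
        (setup, handlers ++ [(k, acts)], some (pvNewH line))
      else (setup ++ [line], handlers ++ [(k, acts)], none) := by
  simp only [pvCoreB, pvNewH, Option.isSome_some, Bool.true_and]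

-- main invariant: the core fold with no open handler tracks A's outer loop, and with an
-- open handler (k, acts) it tracks A's inner collection loop.
theorem pvMain (ls : List String) :
    (∀ setup handlers, pvFinB (ls.foldl pvCoreB (setup, handlers, none)) = pvLoopA ls setup handlers)
    ∧ (∀ setup handlers k acts,
        pvFinB (ls.foldl pvCoreB (setup, handlers, some (k, acts)))
          = pvLoopA (pvCollectA ls acts).2 setup (handlers ++ [(k, (pvCollectA ls acts).1)])) := by
  induction ls with
  | nil =>
    refine ⟨fun setup handlers => ?_, fun setup handlers k acts => ?_⟩
    · simp [pvFinB, pvLoopA]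
    · simp [pvFinB, pvCollectA, pvLoopA]
  | cons line rest ih =>
    refine ⟨fun setup handlers => ?_, fun setup handlers k acts => ?_⟩
    · rw [pvLoopA]
      simp only [List.foldl_cons, pvCoreB_none]
      by_cases hin : PySem.Str.isIn "=>" line = true
      · rw [if_pos hin, if_pos hin]
        exact ih.2 setup handlers _ _
      · rw [if_neg hin, if_neg hin]
        exact ih.1 (setup ++ [line]) handlers
    · simp only [List.foldl_cons, pvCoreB_some]
      by_cases hsw : PySem.Str.startswith line "=>" = true
      · rw [if_pos hsw]
        have hcol : pvCollectA (line :: rest) acts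
            = pvCollectA rest (acts ++ [PySem.Str.strip (PySem.Str.slice line (some 2) none)]) := by
          simp only [pvCollectA]; rw [if_pos hsw]
        rw [hcol]
        exact ih.2 setup handlers k _
      · rw [if_neg hsw]
        have hcol : pvCollectA (line :: rest) acts = (acts, line :: rest) := by
          simp only [pvCollectA]; rw [if_neg hsw]
        rw [hcol]
        by_cases hin : PySem.Str.isIn "=>" line = true
        · rw [if_pos hin, pvLoopA]
          rw [if_pos hin]
          have := ih.2 setup (handlers ++ [(k, acts)]) (pvNewH line).1 (pvNewH line).2
          simp only [pvNewH, List.append_assoc] at this ⊢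
          exact this
        · rw [if_neg hin, pvLoopA]
          rw [if_neg hin]
          exact ih.1 (setup ++ [line]) (handlers ++ [(k, acts)])

-- ===== VERDICT (by name: the statement is the Claim_ definition above) =====
theorem parse_code_block_spec : Claim_equal_parse_code_block := by
  intro code_block _
  unfold Spec_parse_code_block parse_code_block parse_code_block_alt
  rw [pvFoldB_eq_core]
  exact ((pvMain _).1 [] []).symm
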